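-- pv_equiv track=rewrite | github.com/adviyer/mercorhackathon | evaluator_service.py | extract_bottlenecks_from_text
-- ===== SOURCE A (Python) =====
-- from typing import Dict, Any, List, Optional
--
-- def extract_bottlenecks_from_text(text: str) -> List[Dict[str, Any]]:
--     """Extract bottlenecks from raw text when JSON parsing fails."""
--     bottlenecks = []
--
--     # Common bottleneck indicators
--     indicators = [
--         "bottleneck", "issue", "problem", "limitation",
--         "constraint", "slow", "inefficient"
--     ]
--
--     lines = text.split('\n')
--     current_bottleneck = {}
--
--     for i, line in enumerate(lines):
--         line_lower = line.lower()
--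
--         # Check if this line indicates a bottleneck
--         if any(ind in line_lower for ind in indicators):
--             # Save previous bottleneck if it exists
--             if current_bottleneck and "name" in current_bottleneck:
--                 bottlenecks.append(current_bottleneck)
--                 current_bottleneck = {}
--
--             # Extract the bottleneck name
--             current_bottleneck["name"] = line.strip()
--             current_bottleneck["description"] = ""
--
--             # Try to determine impact
--             if "critical" in line_lower or "severe" in line_lower or "major" in line_lower or "high" in line_lower:
--                 current_bottleneck["impact"] = "high"
--             elif "minor" in line_lower or "small" in line_lower or "low" in line_lower:
--                 current_bottleneck["impact"] = "low"
--             else: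
--                 current_bottleneck["impact"] = "medium"
--
--             # Look ahead to gather description
--             for j in range(1, 5):
--                 if i + j < len(lines) and not any(ind in lines[i + j].lower() for ind in indicators):
--                     current_bottleneck["description"] += " " + lines[i + j].strip()
--                 else:
--                     break
--
--     # Add the last bottleneck if it exists
--     if current_bottleneck and "name" in current_bottleneck:
--         bottlenecks.append(current_bottleneck)
--
--     # If no bottlenecks were found, create a generic one
--     if not bottlenecks:
--         bottlenecks.append({
--             "name": "General Performance Issues",
--             "description": "The evaluation couldn't identify specific bottlenecks. Consider general optimization techniques.",
--             "impact": "medium",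
--             "evidence": "Based on overall performance metrics."
--         })
--
--     # Add missing fields
--     for b in bottlenecks:
--         if "evidence" not in b:
--             b["evidence"] = "Identified from code and performance patterns."
--
--     return bottlenecks
-- ===== SOURCE B (Python) =====
-- def extract_bottlenecks_from_text(text):
--     """Extract bottlenecks from raw text when JSON parsing fails.
--
--     Single forward pass over the lines with a small state machine
--     (current bottleneck + number of description lines absorbed so far),
--     instead of re-scanning up to four lines ahead at each indicator line.
--     """
--     indicators = ("bottleneck", "issue", "problem", "limitation",
--                   "constraint", "slow", "inefficient")
--     results = []          # list of [name, description, impact]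
--     current = None
--     desc_count = 0
--
--     for line in text.split('\n'):
--         line_lower = line.lower()
--         if any(ind in line_lower for ind in indicators):
--             if current is not None:
--                 results.append(current)
--             if any(w in line_lower for w in ("critical", "severe", "major", "high")):
--                 impact = "high"
--             elif any(w in line_lower for w in ("minor", "small", "low")):
--                 impact = "low"
--             else:
--                 impact = "medium"
--             current = [line.strip(), "", impact]
--             desc_count = 0
--         elif current is not None and desc_count < 4:
--             current[1] += " " + line.strip()
--             desc_count += 1
--
--     if current is not None:
--         results.append(current)
--
--     if not results:
--         return [{
--             "name": "General Performance Issues",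
--             "description": "The evaluation couldn't identify specific bottlenecks. Consider general optimization techniques.",
--             "impact": "medium",
--             "evidence": "Based on overall performance metrics.",
--         }]
--
--     return [{
--         "name": name,
--         "description": desc,
--         "impact": impact,
--         "evidence": "Identified from code and performance patterns.",
--     } for name, desc, impact in results]
-- ===== Notes on version B (the rewrite author's own statement) =====
-- stated objective: simpler
-- what changed: Replaces A's per-indicator four-line lookahead rescan (and its separate dict bookkeeping) by a single forward pass with a small state machine: a current (name, description, impact) record plus a count of description lines absorbed, flushed at each indicator line and at the end.
import Mathlib
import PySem

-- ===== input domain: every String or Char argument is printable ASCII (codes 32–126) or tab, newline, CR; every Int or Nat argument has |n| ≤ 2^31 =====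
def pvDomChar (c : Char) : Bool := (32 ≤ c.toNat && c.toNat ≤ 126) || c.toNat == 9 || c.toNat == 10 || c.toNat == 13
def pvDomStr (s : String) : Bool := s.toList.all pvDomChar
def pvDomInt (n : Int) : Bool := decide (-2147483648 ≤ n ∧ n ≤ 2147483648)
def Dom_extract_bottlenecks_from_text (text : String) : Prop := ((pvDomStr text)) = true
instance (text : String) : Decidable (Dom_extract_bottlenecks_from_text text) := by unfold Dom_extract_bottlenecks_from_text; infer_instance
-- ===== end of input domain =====

-- B replaces A's per-indicator four-line lookahead rescans by one forward pass with a
-- small state machine (current bottleneck + count of description lines absorbed): simpler/idiomatic, same result.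

-- ===== PORT A =====
-- text.split('\n'): '\n' is a non-empty separator, so it is Chars.splitOn on the code points (exact)
def pvSplitLines (text : String) : List String :=
  (PySem.Chars.splitOn text.toList ['\n']).map String.ofList

def pvIndicators : List String :=
  ["bottleneck", "issue", "problem", "limitation", "constraint", "slow", "inefficient"]

def pvHasInd (lineLower : String) : Bool :=
  pvIndicators.any (fun ind => PySem.Str.isIn ind lineLower)

-- A's inner lookahead loop `for j in range(1, 5): … else break`, as structural recursion on j,
-- accumulating the text appended to current_bottleneck["description"].
def pvLookA (lines : List String) (i : Nat) (j : Nat) : String :=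
  if j ≤ 4 then
    match lines[i + j]? with
    | some l => if pvHasInd (PySem.Str.lower l) then "" else " " ++ PySem.Str.strip l ++ pvLookA lines i (j + 1)
    | none => ""
  else ""
termination_by 5 - j

def pvStepA (lines : List String) (st : List (PySem.Dict String String) × PySem.Dict String String)
    (p : String × Nat) : List (PySem.Dict String String) × PySem.Dict String String :=
  let line := p.1
  let i := p.2
  let line_lower := PySem.Str.lower line
  if pvHasInd line_lower then
    let btls := if st.2.size != 0 && st.2.contains "name" then st.1 ++ [st.2] else st.1
    let cb := (PySem.Dict.empty.insert "name" (PySem.Str.strip line)).insert "description" ""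
    let cb := cb.insert "impact"
      (if PySem.Str.isIn "critical" line_lower || PySem.Str.isIn "severe" line_lower ||
          PySem.Str.isIn "major" line_lower || PySem.Str.isIn "high" line_lower then "high"
       else if PySem.Str.isIn "minor" line_lower || PySem.Str.isIn "small" line_lower ||
          PySem.Str.isIn "low" line_lower then "low"
       else "medium")
    let cb := cb.modify "description" "" (· ++ pvLookA lines i 1)
    (btls, cb)
  else st

def extract_bottlenecks_from_text (text : String) : List (List (String × String)) :=
  let lines := pvSplitLines text
  let r := lines.zipIdx.foldl (pvStepA lines) ([], PySem.Dict.empty)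
  let btls := if r.2.size != 0 && r.2.contains "name" then r.1 ++ [r.2] else r.1
  let btls := if btls.isEmpty then
      [PySem.Dict.ofList [("name", "General Performance Issues"),
        ("description", "The evaluation couldn't identify specific bottlenecks. Consider general optimization techniques."),
        ("impact", "medium"),
        ("evidence", "Based on overall performance metrics.")]]
    else btls
  let btls := btls.map (fun b =>
    if !(b.contains "evidence") then b.insert "evidence" "Identified from code and performance patterns." else b)
  btls.map (·.items)

-- ===== PORT B =====
def pvImpactB (lineLower : String) : String :=
  if ["critical", "severe", "major", "high"].any (fun w => PySem.Str.isIn w lineLower) then "high"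
  else if ["minor", "small", "low"].any (fun w => PySem.Str.isIn w lineLower) then "low"
  else "medium"

def pvStepB (st : List (String × String × String) × Option (String × String × String) × Nat)
    (line : String) : List (String × String × String) × Option (String × String × String) × Nat :=
  let line_lower := PySem.Str.lower line
  if pvHasInd line_lower then
    let results := match st.2.1 with
      | some c => st.1 ++ [c]
      | none => st.1
    (results, some (PySem.Str.strip line, "", pvImpactB line_lower), 0)
  else
    match st.2.1 with
    | some c =>
        if st.2.2 < 4 then (st.1, some (c.1, c.2.1 ++ " " ++ PySem.Str.strip line, c.2.2), st.2.2 + 1)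
        else st
    | none => st

def extract_bottlenecks_from_text_alt (text : String) : List (List (String × String)) :=
  let st := (pvSplitLines text).foldl pvStepB ([], none, 0)
  let results := match st.2.1 with
    | some c => st.1 ++ [c]
    | none => st.1
  if results.isEmpty then
    [[("name", "General Performance Issues"),
      ("description", "The evaluation couldn't identify specific bottlenecks. Consider general optimization techniques."),
      ("impact", "medium"),
      ("evidence", "Based on overall performance metrics.")]]
  else
    results.map (fun c => [("name", c.1), ("description", c.2.1), ("impact", c.2.2),
      ("evidence", "Identified from code and performance patterns.")])

-- ===== PRECONDITION & SPEC =====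
def Spec_extract_bottlenecks_from_text (text : String) (out : List (List (String × String))) : Prop := out = extract_bottlenecks_from_text_alt text
instance (text : String) (out : List (List (String × String))) : Decidable (Spec_extract_bottlenecks_from_text text out) := by unfold Spec_extract_bottlenecks_from_text; infer_instance

-- ===== CLAIM (what is proved, stated in full; the proofs are below) =====
def Claim_equal_extract_bottlenecks_from_text : Prop := ∀ (text : String), Dom_extract_bottlenecks_from_text text → Spec_extract_bottlenecks_from_text text (extract_bottlenecks_from_text text)

-- ===== LEMMAS AND PROOFS =====

-- the text A's lookahead appends, computed from the lines after the indicator line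
def pvLa : List String → Nat → String
  | [], _ => ""
  | l :: r, k =>
    if k = 0 then ""
    else if pvHasInd (PySem.Str.lower l) then ""
    else " " ++ PySem.Str.strip l ++ pvLa r (k - 1)

-- the bottleneck dict built from B's (name, description, impact) triple
def pvMkT (c : String × String × String) : PySem.Dict String String :=
  ((PySem.Dict.empty.insert "name" c.1).insert "description" c.2.1).insert "impact" c.2.2

-- A's current_bottleneck, as B's current plus the description text still pending in A's lookahead
def pvCurA : Option (String × String × String) → String → PySem.Dict String String
  | none, _ => PySem.Dict.empty
  | some c, pend => pvMkT (c.1, c.2.1 ++ pend, c.2.2)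

theorem pvLa_zero (xs : List String) : pvLa xs 0 = "" := by
  cases xs <;> simp [pvLa]

theorem pvLookA_eq (lines : List String) :
    ∀ (f i j : Nat), 5 - j = f → 1 ≤ j → pvLookA lines i j = pvLa (lines.drop (i + j)) f := by
  intro f
  induction f with
  | zero =>
    intro i j hf _
    unfold pvLookA
    rw [if_neg (by omega)]
    rw [pvLa_zero]
  | succ k ih =>
    intro i j hf hj
    unfold pvLookA
    rw [if_pos (by omega)]
    cases h : lines[i + j]? with
    | none =>
      have : lines.drop (i + j) = [] := by
        have := List.getElem?_eq_none_iff.mp h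
        exact List.drop_eq_nil_of_le this
      rw [this]; rfl
    | some l =>
      have hlt : i + j < lines.length := by
        by_contra hge
        rw [List.getElem?_eq_none_iff.mpr (by omega)] at h
        simp at h
      have hdrop : lines.drop (i + j) = l :: lines.drop (i + j + 1) := by
        rw [List.drop_eq_getElem_cons hlt]
        have : lines[i + j] = l := by
          have := List.getElem?_eq_getElem hlt
          rw [h] at this; exact (Option.some.injEq _ _).mp this.symm
        rw [this]
      rw [hdrop]
      simp only [pvLa, Nat.succ_ne_zero, if_false]
      by_cases hi : pvHasInd (PySem.Str.lower l)
      · simp [hi]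
      · simp only [hi, if_false, Bool.false_eq_true]
        rw [ih i (j + 1) (by omega) (by omega)]
        simp [Nat.add_assoc]

theorem pvCurA_some_empty (c : String × String × String) : pvCurA (some c) "" = pvMkT c := by
  simp [pvCurA, pvMkT]

theorem pvFlushA_some (c : String × String × String) :
    ((pvCurA (some c) "").size != 0 && (pvCurA (some c) "").contains "name") = true := by
  rfl

-- the main loop invariant: A's fold over the (line, index) pairs of a suffix equals B's fold,
-- with A's current bottleneck carrying the description text its lookahead has already taken
theorem pvMain (lines : List String) :
    ∀ (rest : List String) (i : Nat), lines.drop i = rest →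
    ∀ (accB : List (String × String × String)) (cur : Option (String × String × String)) (cnt : Nat),
    (rest.zipIdx i).foldl (pvStepA lines) (accB.map pvMkT, pvCurA cur (pvLa rest (4 - cnt)))
      = ((rest.foldl pvStepB (accB, cur, cnt)).1.map pvMkT,
         pvCurA (rest.foldl pvStepB (accB, cur, cnt)).2.1 "") := by
  intro rest
  induction rest with
  | nil =>
    intro i _ accB cur cnt
    cases cur <;> simp [pvLa, pvCurA]
  | cons l r ih =>
    intro i hdrop accB cur cnt
    have hr : lines.drop (i + 1) = r := by
      rw [← List.tail_drop, hdrop]; rfl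
    rw [List.zipIdx_cons]
    simp only [List.foldl_cons]
    by_cases hind : pvHasInd (PySem.Str.lower l)
    · -- indicator line: both flush and start a new bottleneck
      have hla : pvLa (l :: r) (4 - cnt) = "" := by
        simp [pvLa, hind]
      have hlook : pvLookA lines i 1 = pvLa r 4 := by
        rw [pvLookA_eq lines 4 i 1 (by omega) (by omega), hr]
      have himp : (if PySem.Str.isIn "critical" (PySem.Str.lower l) || PySem.Str.isIn "severe" (PySem.Str.lower l) ||
          PySem.Str.isIn "major" (PySem.Str.lower l) || PySem.Str.isIn "high" (PySem.Str.lower l) then "high"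
        else if PySem.Str.isIn "minor" (PySem.Str.lower l) || PySem.Str.isIn "small" (PySem.Str.lower l) ||
          PySem.Str.isIn "low" (PySem.Str.lower l) then "low" else "medium") = pvImpactB (PySem.Str.lower l) := by
        simp only [pvImpactB, List.any_cons, List.any_nil, Bool.or_false, Bool.or_assoc]
      have hstepB : pvStepB (accB, cur, cnt) l
          = ((match cur with | some c => accB ++ [c] | none => accB),
             some (PySem.Str.strip l, "", pvImpactB (PySem.Str.lower l)), 0) := by
        simp [pvStepB, hind]
      have hstepA : pvStepA lines (accB.map pvMkT, pvCurA cur (pvLa (l :: r) (4 - cnt))) (l, i)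
          = ((match cur with | some c => accB ++ [c] | none => accB).map pvMkT,
             pvCurA (some (PySem.Str.strip l, "", pvImpactB (PySem.Str.lower l))) (pvLa r 4)) := by
        simp only [pvStepA, hind, if_pos, hla]
        cases cur with
        | none =>
          simp only [pvCurA]
          rw [if_neg (by decide)]
          rw [himp, hlook]
          rfl
        | some c =>
          rw [pvFlushA_some c]
          simp only [if_pos]
          rw [himp, hlook, pvCurA_some_empty]
          simp only [pvCurA]
          rw [List.map_append]
          rfl
      rw [hstepA, hstepB]
      exact ih (i + 1) hr _ (some (PySem.Str.strip l, "", pvImpactB (PySem.Str.lower l))) 0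
    · -- non-indicator line: A does nothing, B may absorb the line into the description
      have hstepA : pvStepA lines (accB.map pvMkT, pvCurA cur (pvLa (l :: r) (4 - cnt))) (l, i)
          = (accB.map pvMkT, pvCurA cur (pvLa (l :: r) (4 - cnt))) := by
        simp [pvStepA, hind]
      rw [hstepA]
      cases cur with
      | none =>
        have hstepB : pvStepB (accB, none, cnt) l = (accB, none, cnt) := by
          simp [pvStepB, hind]
        rw [hstepB]
        have : pvCurA none (pvLa (l :: r) (4 - cnt)) = pvCurA none (pvLa r (4 - cnt)) := rfl
        rw [this]
        exact ih (i + 1) hr accB none cnt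
      | some c =>
        by_cases hcnt : cnt < 4
        · have hstepB : pvStepB (accB, some c, cnt) l
              = (accB, some (c.1, c.2.1 ++ " " ++ PySem.Str.strip l, c.2.2), cnt + 1) := by
            simp [pvStepB, hind, hcnt]
          rw [hstepB]
          have hla : pvLa (l :: r) (4 - cnt) = " " ++ PySem.Str.strip l ++ pvLa r (4 - (cnt + 1)) := by
            have h1 : 4 - cnt ≠ 0 := by omega
            have h2 : 4 - cnt - 1 = 4 - (cnt + 1) := by omega
            simp [pvLa, h1, hind, h2]
          rw [hla]
          have hcur : pvCurA (some c) (" " ++ PySem.Str.strip l ++ pvLa r (4 - (cnt + 1)))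
              = pvCurA (some (c.1, c.2.1 ++ " " ++ PySem.Str.strip l, c.2.2)) (pvLa r (4 - (cnt + 1))) := by
            simp [pvCurA, pvMkT, String.append_assoc]
          rw [hcur]
          exact ih (i + 1) hr accB _ (cnt + 1)
        · have hstepB : pvStepB (accB, some c, cnt) l = (accB, some c, cnt) := by
            simp [pvStepB, hind, hcnt]
          rw [hstepB]
          have h0 : 4 - cnt = 0 := by omega
          have hla2 : pvLa (l :: r) (4 - cnt) = pvLa r (4 - cnt) := by
            rw [h0, pvLa_zero, pvLa_zero]
          rw [hla2]
          exact ih (i + 1) hr accB (some c) cnt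

theorem pvMkT_evidence (c : String × String × String) :
    (pvMkT c).contains "evidence" = false ∧
    ((pvMkT c).insert "evidence" "Identified from code and performance patterns.").items
      = [("name", c.1), ("description", c.2.1), ("impact", c.2.2),
         ("evidence", "Identified from code and performance patterns.")] := by
  exact ⟨rfl, rfl⟩

theorem pvPost (ts : List (String × String × String)) :
    ((ts.map pvMkT).map (fun b =>
        if !(b.contains "evidence") then b.insert "evidence" "Identified from code and performance patterns." else b)).map (·.items)
      = ts.map (fun c => [("name", c.1), ("description", c.2.1), ("impact", c.2.2),
          ("evidence", "Identified from code and performance patterns.")]) := by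
  induction ts with
  | nil => rfl
  | cons c cs ih =>
    simp only [List.map_cons] at ih ⊢
    rw [ih]
    simp [(pvMkT_evidence c).1, (pvMkT_evidence c).2]

theorem pvFlushMk (c : String × String × String) :
    ((pvMkT c).size != 0 && (pvMkT c).contains "name") = true := rfl

-- ===== VERDICT (by name: the statement is the Claim_ definition above) =====
theorem extract_bottlenecks_from_text_spec : Claim_equal_extract_bottlenecks_from_text := by
  intro text _
  unfold Spec_extract_bottlenecks_from_text
  unfold extract_bottlenecks_from_text extract_bottlenecks_from_text_alt
  have hmain := pvMain (pvSplitLines text) (pvSplitLines text) 0 rfl [] none 0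
  simp only [List.map_nil] at hmain
  rw [show pvCurA none (pvLa (pvSplitLines text) (4 - 0)) = PySem.Dict.empty from rfl] at hmain
  simp only []
  rw [hmain]
  generalize List.foldl pvStepB ([], none, 0) (pvSplitLines text) = s
  obtain ⟨res, cur, cnt⟩ := s
  cases cur with
  | none =>
    simp only [pvCurA]
    have hflush : ((PySem.Dict.empty : PySem.Dict String String).size != 0 &&
        (PySem.Dict.empty : PySem.Dict String String).contains "name") = false := by decide
    rw [hflush]
    simp only [Bool.false_eq_true, if_false]
    cases res with
    | nil => rfl
    | cons c cs =>
      simp only [List.map_cons, List.isEmpty_cons, Bool.false_eq_true, if_false]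
      have := pvPost (c :: cs)
      simpa only [List.map_cons] using this
  | some c =>
    rw [pvCurA_some_empty, if_pos (pvFlushMk c)]
    have h1 : (res.map pvMkT ++ [pvMkT c]).isEmpty = false := by simp
    have h2 : (res ++ [c]).isEmpty = false := by simp
    rw [h1, h2]
    simp only [Bool.false_eq_true, if_false]
    have := pvPost (res ++ [c])
    simpa only [List.map_append] using this
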